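-- pv_equiv track=rewrite | github.com/JackStar6677-1/VeyonScripts | scripts/principales/VEYON_MAESTRO.py | collect_network_conflicts
-- ===== SOURCE A (Python) =====
-- from collections import defaultdict
-- from typing import List, Dict, Tuple
--
-- def collect_network_conflicts(devices: List[Dict]) -> Tuple[Dict[str, List[Dict]], Dict[str, List[Dict]]]:
--     """Agrupa dispositivos por IP y MAC para detectar clones o datos inconsistentes."""
--     by_ip: Dict[str, List[Dict]] = defaultdict(list)
--     by_mac: Dict[str, List[Dict]] = defaultdict(list)
--
--     for device in devices:
--         ip = (device.get("ip") or "").strip()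
--         mac = (device.get("mac") or "").strip().upper()
--         if not ip or not mac:
--             continue
--         by_ip[ip].append(device)
--         by_mac[mac].append(device)
--
--     conflict_ips = {
--         ip: entries
--         for ip, entries in by_ip.items()
--         if len({(entry.get("mac") or "").strip().upper() for entry in entries}) > 1
--     }
--     conflict_macs = {
--         mac: entries
--         for mac, entries in by_mac.items()
--         if len({(entry.get("ip") or "").strip() for entry in entries}) > 1
--     }
--     return conflict_ips, conflict_macs
-- ===== SOURCE B (Python) =====
-- def collect_network_conflicts(devices):
--     """Detect-then-collect: normalize once into triples; pass 1 marks a key as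
--     conflicted the moment an entry's counterpart value differs from the FIRST
--     value seen for that key (no grouping, no per-key value sets); pass 2 then
--     groups only the entries whose key was marked conflicted."""
--     triples = []
--     for device in devices:
--         ip = (device.get("ip") or "").strip()
--         mac = (device.get("mac") or "").strip().upper()
--         if ip and mac:
--             triples.append((ip, mac, device))
--
--     first_mac = {}
--     bad_ips = set()
--     first_ip = {}
--     bad_macs = set()
--     for ip, mac, _ in triples:
--         if first_mac.setdefault(ip, mac) != mac:
--             bad_ips.add(ip)
--         if first_ip.setdefault(mac, ip) != ip:
--             bad_macs.add(mac)
--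
--     conflict_ips = {}
--     conflict_macs = {}
--     for ip, mac, device in triples:
--         if ip in bad_ips:
--             conflict_ips.setdefault(ip, []).append(device)
--         if mac in bad_macs:
--             conflict_macs.setdefault(mac, []).append(device)
--     return conflict_ips, conflict_macs
-- ===== Notes on version B (the rewrite author's own statement) =====
-- stated objective: alternative
-- what changed: B never builds the full by_ip/by_mac grouping nor any set of values per key: a first pass marks a key conflicted as soon as an entry's counterpart differs from the first value seen for that key, and a second pass groups only entries under keys already known conflicted.
import Mathlib
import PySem

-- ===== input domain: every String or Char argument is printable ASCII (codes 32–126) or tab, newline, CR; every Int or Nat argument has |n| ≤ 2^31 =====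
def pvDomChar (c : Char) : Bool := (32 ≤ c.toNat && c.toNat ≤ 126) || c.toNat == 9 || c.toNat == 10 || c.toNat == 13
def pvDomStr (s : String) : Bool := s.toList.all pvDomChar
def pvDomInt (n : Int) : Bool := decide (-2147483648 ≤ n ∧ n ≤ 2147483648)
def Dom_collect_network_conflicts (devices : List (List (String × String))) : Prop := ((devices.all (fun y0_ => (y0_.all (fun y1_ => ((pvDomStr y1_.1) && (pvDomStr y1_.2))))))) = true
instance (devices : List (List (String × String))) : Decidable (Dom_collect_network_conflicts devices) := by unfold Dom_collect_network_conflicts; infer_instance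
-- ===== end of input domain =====

-- B replaces A's group-then-rescan by detect-then-collect: one pass marks a key conflicted
-- when an entry's counterpart differs from the first value seen for that key, a second pass
-- groups only entries under conflicted keys; no full grouping or per-key value set is built.


-- ===== PORT A =====
-- (device.get("ip") or "").strip()  ('or ""' is the identity on str values: "" stays "")
def pvNormIp (dev : List (String × String)) : String :=
  PySem.Str.strip ((PySem.Dict.mk dev).getD "ip" "")
-- (device.get("mac") or "").strip().upper()
def pvNormMac (dev : List (String × String)) : String :=
  PySem.Str.upper (PySem.Str.strip ((PySem.Dict.mk dev).getD "mac" ""))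

def collect_network_conflicts (devices : List (List (String × String))) : (List (String × List (List (String × String)))) × (List (String × List (List (String × String)))) :=
  let grouped := devices.foldl
    (fun (st : PySem.Dict String (List (List (String × String))) × PySem.Dict String (List (List (String × String)))) dev =>
      if pvNormIp dev = "" ∨ pvNormMac dev = "" then st
      else (st.1.modify (pvNormIp dev) [] (fun es => es ++ [dev]),
            st.2.modify (pvNormMac dev) [] (fun es => es ++ [dev])))
    (PySem.Dict.empty, PySem.Dict.empty)
  (grouped.1.items.filter (fun p => decide (1 < PySem.Set.len (PySem.Set.ofList (p.2.map pvNormMac)))),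
   grouped.2.items.filter (fun p => decide (1 < PySem.Set.len (PySem.Set.ofList (p.2.map pvNormIp)))))

-- ===== PORT B =====
-- pass 0: normalize once into triples (ip, mac, device), keeping only entries with both fields;
-- pass 1: first_mac/bad_ips and first_ip/bad_macs — 'setdefault(k, v) != v' is ported as the
--   match on get?: an existing first value is compared, a missing key is inserted (the
--   comparison of the just-inserted default with itself is vacuously equal, so no add);
-- pass 2: group only entries whose key is in the bad set.
-- one step of pass 1 (first-seen value vs current, per key) and of pass 2 (conditional append),
-- for the ip key and for the mac key
def pvFirstIp (st : PySem.Dict String String × PySem.Set String) (t : String × String × List (String × String)) : PySem.Dict String String × PySem.Set String :=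
  match st.1.get? t.1 with
  | some v => (st.1, if v ≠ t.2.1 then st.2.add t.1 else st.2)
  | none => (st.1.insert t.1 t.2.1, st.2)

def pvFirstMac (st : PySem.Dict String String × PySem.Set String) (t : String × String × List (String × String)) : PySem.Dict String String × PySem.Set String :=
  match st.1.get? t.2.1 with
  | some v => (st.1, if v ≠ t.1 then st.2.add t.2.1 else st.2)
  | none => (st.1.insert t.2.1 t.1, st.2)

def pvCollectIp (bad : PySem.Set String) (d : PySem.Dict String (List (List (String × String)))) (t : String × String × List (String × String)) : PySem.Dict String (List (List (String × String))) :=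
  if PySem.Set.contains bad t.1 then d.modify t.1 [] (fun es => es ++ [t.2.2]) else d

def pvCollectMac (bad : PySem.Set String) (d : PySem.Dict String (List (List (String × String)))) (t : String × String × List (String × String)) : PySem.Dict String (List (List (String × String))) :=
  if PySem.Set.contains bad t.2.1 then d.modify t.2.1 [] (fun es => es ++ [t.2.2]) else d

def collect_network_conflicts_alt (devices : List (List (String × String))) : (List (String × List (List (String × String)))) × (List (String × List (List (String × String)))) :=
  let triples := devices.foldl
    (fun acc dev =>
      if pvNormIp dev ≠ "" ∧ pvNormMac dev ≠ "" then acc ++ [(pvNormIp dev, pvNormMac dev, dev)]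
      else acc) []
  let det := triples.foldl
    (fun st t => (pvFirstIp st.1 t, pvFirstMac st.2 t))
    ((PySem.Dict.empty, PySem.Set.empty), (PySem.Dict.empty, PySem.Set.empty))
  let res := triples.foldl
    (fun st t => (pvCollectIp det.1.2 st.1 t, pvCollectMac det.2.2 st.2 t))
    (PySem.Dict.empty, PySem.Dict.empty)
  (res.1.items, res.2.items)

-- ===== PRECONDITION & SPEC =====
def Spec_collect_network_conflicts (devices : List (List (String × String))) (out : (List (String × List (List (String × String)))) × (List (String × List (List (String × String))))) : Prop := out = collect_network_conflicts_alt devices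
instance (devices : List (List (String × String))) (out : (List (String × List (List (String × String)))) × (List (String × List (List (String × String))))) : Decidable (Spec_collect_network_conflicts devices out) := by unfold Spec_collect_network_conflicts; exact instDecidableEqProd _ _

-- ===== CLAIM (what is proved, stated in full; the proofs are below) =====
def Claim_equal_collect_network_conflicts : Prop := ∀ (devices : List (List (String × String))), Dom_collect_network_conflicts devices → Spec_collect_network_conflicts devices (collect_network_conflicts devices)

-- ===== LEMMAS AND PROOFS =====

-- shared shapes of both ports' loops, named for the proof
def pvGrpStep (d : PySem.Dict String (List (List (String × String)))) (t : String × String × List (String × String)) : PySem.Dict String (List (List (String × String))) :=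
  d.modify t.1 [] (fun es => es ++ [t.2.2])

def pvBad (ts : List (String × String × List (String × String))) : PySem.Set String :=
  (ts.foldl pvFirstIp (PySem.Dict.empty, PySem.Set.empty)).2

def pvEnt (ts : List (String × String × List (String × String))) (k : String) : List (List (String × String)) :=
  (ts.filter (fun t => t.1 == k)).map (fun t => t.2.2)

def pvOth (ts : List (String × String × List (String × String))) (k : String) : List String :=
  (ts.filter (fun t => t.1 == k)).map (fun t => t.2.1)

def pvBadCond : Option String → List String → Prop
  | some v, os => ∃ m ∈ os, m ≠ v
  | none, [] => False
  | none, m0 :: rest => ∃ m ∈ rest, m ≠ m0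

def pvTrips (devices : List (List (String × String))) : List (String × String × List (String × String)) :=
  devices.foldl
    (fun acc dev =>
      if pvNormIp dev ≠ "" ∧ pvNormMac dev ≠ "" then acc ++ [(pvNormIp dev, pvNormMac dev, dev)]
      else acc) []

def pvSwap (t : String × String × List (String × String)) : String × String × List (String × String) :=
  (t.2.1, t.1, t.2.2)

def pvAOut (ts : List (String × String × List (String × String))) (f : List (String × String) → String) : List (String × List (List (String × String))) :=
  (ts.foldl pvGrpStep PySem.Dict.empty).items.filter
    (fun p => decide (1 < PySem.Set.len (PySem.Set.ofList (p.2.map f))))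

def pvBOut (ts : List (String × String × List (String × String))) : List (String × List (List (String × String))) :=
  (ts.foldl (pvCollectIp (pvBad ts)) PySem.Dict.empty).items

lemma pvTrips_acc (devices : List (List (String × String))) :
    ∀ (acc : List (String × String × List (String × String))),
    devices.foldl
      (fun acc dev =>
        if pvNormIp dev ≠ "" ∧ pvNormMac dev ≠ "" then acc ++ [(pvNormIp dev, pvNormMac dev, dev)]
        else acc) acc
      = acc ++ devices.foldl
          (fun acc dev =>
            if pvNormIp dev ≠ "" ∧ pvNormMac dev ≠ "" then acc ++ [(pvNormIp dev, pvNormMac dev, dev)]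
            else acc) [] := by
  induction devices with
  | nil => intro acc; simp
  | cons d ds ih =>
    intro acc
    simp only [List.foldl_cons]
    rw [ih, ih (if pvNormIp d ≠ "" ∧ pvNormMac d ≠ "" then [] ++ [(pvNormIp d, pvNormMac d, d)] else [])]
    split_ifs <;> simp

lemma pvTrips_closed (devices : List (List (String × String))) :
    pvTrips devices
      = (devices.filter (fun d => decide (pvNormIp d ≠ "" ∧ pvNormMac d ≠ ""))).map
          (fun d => (pvNormIp d, pvNormMac d, d)) := by
  induction devices with
  | nil => rfl
  | cons d ds ih =>
    unfold pvTrips at ih ⊢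
    simp only [List.foldl_cons, List.filter_cons]
    by_cases h : pvNormIp d ≠ "" ∧ pvNormMac d ≠ ""
    · rw [if_pos h, pvTrips_acc, ih]
      simp [h]
    · rw [if_neg h, ih]
      simp [h]

lemma pvA_fold (devices : List (List (String × String)))
    (st : PySem.Dict String (List (List (String × String))) × PySem.Dict String (List (List (String × String)))) :
    devices.foldl
      (fun st dev =>
        if pvNormIp dev = "" ∨ pvNormMac dev = "" then st
        else (st.1.modify (pvNormIp dev) [] (fun es => es ++ [dev]),
              st.2.modify (pvNormMac dev) [] (fun es => es ++ [dev]))) st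
      = (pvTrips devices).foldl
          (fun st t => (pvGrpStep st.1 t, pvGrpStep st.2 (pvSwap t))) st := by
  induction devices generalizing st with
  | nil => rfl
  | cons d ds ih =>
    simp only [List.foldl_cons]
    by_cases h : pvNormIp d = "" ∨ pvNormMac d = ""
    · rw [if_pos h]
      have ht : pvTrips (d :: ds) = pvTrips ds := by
        unfold pvTrips
        simp only [List.foldl_cons]
        rw [if_neg (by rcases h with h | h <;> simp [h])]
      rw [ht]
      exact ih st
    · rw [if_neg h]
      have ht : pvTrips (d :: ds) = (pvNormIp d, pvNormMac d, d) :: pvTrips ds := by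
        unfold pvTrips
        simp only [List.foldl_cons]
        rw [if_pos (not_or.mp h), pvTrips_acc]
        simp
      rw [ht, List.foldl_cons]
      exact ih _

lemma pvGrp_keys (ts : List (String × String × List (String × String))) :
    (ts.foldl pvGrpStep PySem.Dict.empty).keys = PySem.Set.ofList (ts.map (fun t => t.1)) := by
  unfold pvGrpStep
  have h := PySem.Dict.keys_foldl_modify_key ts (fun t => t.1) ([] : List (List (String × String)))
    (fun _ t es => es ++ [t.2.2]) PySem.Dict.empty
  simpa [PySem.Dict.keys_empty, PySem.Set.update_nil_left] using h

lemma pvGrp_nodup (ts : List (String × String × List (String × String))) :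
    (ts.foldl pvGrpStep PySem.Dict.empty).keys.Nodup := by
  unfold pvGrpStep
  exact PySem.Dict.nodup_keys_foldl_modify_key ts (fun t => t.1) ([] : List (List (String × String)))
    (fun _ t es => es ++ [t.2.2]) PySem.Dict.empty (by simp [PySem.Dict.keys_empty])

lemma pvGrp_getD (ts : List (String × String × List (String × String))) (k : String) :
    (ts.foldl pvGrpStep PySem.Dict.empty).getD k [] = pvEnt ts k := by
  unfold pvGrpStep pvEnt
  have h := PySem.Dict.getD_foldl_modify_append (ts.map (fun t => (t.1, t.2.2))) PySem.Dict.empty k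
  rw [List.foldl_map] at h
  simpa [PySem.Dict.getD_empty, List.filter_map, List.map_map, Function.comp] using h

lemma pvGrp_items (ts : List (String × String × List (String × String))) :
    (ts.foldl pvGrpStep PySem.Dict.empty).items
      = (PySem.Set.ofList (ts.map (fun t => t.1))).map (fun k => (k, pvEnt ts k)) := by
  rw [PySem.Dict.items_eq_map_keys _ (pvGrp_nodup ts) [], pvGrp_keys]
  exact List.map_congr_left (fun k _ => by rw [pvGrp_getD])

lemma pvOfList_filter {α : Type} [BEq α] [LawfulBEq α] (p : α → Bool) (xs : List α) :
    PySem.Set.ofList (xs.filter p) = (PySem.Set.ofList xs).filter p := by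
  induction xs using List.reverseRecOn with
  | nil => rfl
  | append_singleton xs x ih =>
    rw [List.filter_append, PySem.Set.ofList_append_singleton]
    by_cases hp : p x = true
    · simp only [List.filter_cons, List.filter_nil, hp, if_pos]
      rw [PySem.Set.ofList_append_singleton, ih]
      by_cases hm : x ∈ PySem.Set.ofList xs
      · rw [PySem.Set.add_of_mem hm, PySem.Set.add_of_mem (by simp [List.mem_filter, hm, hp])]
      · rw [PySem.Set.add_of_not_mem hm, PySem.Set.add_of_not_mem (by simp [List.mem_filter, hm])]
        simp [hp]
    · simp only [List.filter_cons, List.filter_nil, hp]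
      by_cases hm : x ∈ PySem.Set.ofList xs
      · rw [PySem.Set.add_of_mem hm]
        simpa using ih
      · rw [PySem.Set.add_of_not_mem hm]
        simp only [List.filter_append, List.filter_cons, List.filter_nil, hp]
        simpa using ih

lemma pvDet_mem (ts : List (String × String × List (String × String)))
    (fm : PySem.Dict String String) (bad : PySem.Set String) (k : String) :
    (k ∈ (ts.foldl pvFirstIp (fm, bad)).2) ↔ (k ∈ bad ∨ pvBadCond (fm.get? k) (pvOth ts k)) := by
  induction ts generalizing fm bad with
  | nil =>
    cases h : fm.get? k <;> simp [pvOth, pvBadCond]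
  | cons t ts ih =>
    simp only [List.foldl_cons]
    by_cases hk : t.1 = k
    · subst hk
      cases hv : fm.get? t.1 with
      | some v =>
        rw [show pvFirstIp (fm, bad) t = (fm, if v ≠ t.2.1 then bad.add t.1 else bad) from by
              simp [pvFirstIp, hv]]
        rw [ih, hv]
        have hoth : pvOth (t :: ts) t.1 = t.2.1 :: pvOth ts t.1 := by simp [pvOth]
        rw [hoth]
        by_cases hvm : v = t.2.1
        · rw [if_neg (by simp [hvm])]
          simp only [pvBadCond, List.mem_cons]
          constructor
          · rintro (hb | ⟨m, hm, hne⟩)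
            · exact Or.inl hb
            · exact Or.inr ⟨m, Or.inr hm, hne⟩
          · rintro (hb | ⟨m, (rfl | hm), hne⟩)
            · exact Or.inl hb
            · exact absurd hvm.symm hne
            · exact Or.inr ⟨m, hm, hne⟩
        · rw [if_pos (by simp [hvm])]
          simp only [pvBadCond, PySem.Set.mem_add, List.mem_cons]
          constructor
          · intro _; exact Or.inr ⟨t.2.1, Or.inl rfl, fun h => hvm h.symm⟩
          · intro _; exact Or.inl (Or.inr trivial)
      | none =>
        rw [show pvFirstIp (fm, bad) t = (fm.insert t.1 t.2.1, bad) from by simp [pvFirstIp, hv]]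
        rw [ih, PySem.Dict.get?_insert_self]
        have hoth : pvOth (t :: ts) t.1 = t.2.1 :: pvOth ts t.1 := by simp [pvOth]
        rw [hoth]
        cases hlist : pvOth ts t.1 <;> simp [pvBadCond]
    · have hoth : pvOth (t :: ts) k = pvOth ts k := by
        simp [pvOth, hk]
      cases hv : fm.get? t.1 with
      | some v =>
        rw [show pvFirstIp (fm, bad) t = (fm, if v ≠ t.2.1 then bad.add t.1 else bad) from by
              simp [pvFirstIp, hv]]
        rw [ih, hoth]
        have hmem : (k ∈ (if v ≠ t.2.1 then bad.add t.1 else bad)) ↔ k ∈ bad := by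
          split_ifs
          · rw [PySem.Set.mem_add]
            simp [Ne.symm hk]
          · rfl
        rw [hmem]
      | none =>
        rw [show pvFirstIp (fm, bad) t = (fm.insert t.1 t.2.1, bad) from by simp [pvFirstIp, hv]]
        rw [ih, hoth, PySem.Dict.get?_insert_of_ne _ _ (Ne.symm hk)]

lemma pvCard (m0 : String) (rest : List String) :
    (1 < PySem.Set.len (PySem.Set.ofList (m0 :: rest))) ↔ ∃ m ∈ rest, m ≠ m0 := by
  rw [PySem.Set.ofList_cons]
  simp only [PySem.Set.len, List.length_cons]
  constructor
  · intro h
    have : 0 < ((PySem.Set.ofList rest).discard m0).length := by omega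
    obtain ⟨m, hm⟩ := List.exists_mem_of_length_pos this
    obtain ⟨hm1, hm2⟩ := (PySem.Set.mem_discard _ _ _).mp hm
    exact ⟨m, (PySem.Set.mem_ofList _ _).mp hm1, hm2⟩
  · rintro ⟨m, hm, hne⟩
    have : m ∈ (PySem.Set.ofList rest).discard m0 :=
      (PySem.Set.mem_discard _ _ _).mpr ⟨(PySem.Set.mem_ofList _ _).mpr hm, hne⟩
    have := List.length_pos_of_mem this
    omega

lemma pvCond_eq (ts : List (String × String × List (String × String))) (k : String)
    (hk : k ∈ PySem.Set.ofList (ts.map (fun t => t.1))) :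
    decide (1 < PySem.Set.len (PySem.Set.ofList (pvOth ts k))) = PySem.Set.contains (pvBad ts) k := by
  have hbad : (k ∈ pvBad ts) ↔ pvBadCond none (pvOth ts k) := by
    unfold pvBad
    rw [pvDet_mem, PySem.Dict.get?_empty]
    simp [PySem.Set.empty]
  have hne : pvOth ts k ≠ [] := by
    intro hnil
    obtain ⟨t, ht, htk⟩ := List.mem_map.mp ((PySem.Set.mem_ofList _ _).mp hk)
    unfold pvOth at hnil
    rw [List.map_eq_nil_iff, List.filter_eq_nil_iff] at hnil
    exact (hnil t ht) (by simp [htk])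
  obtain ⟨m0, rest, hlist⟩ := List.exists_cons_of_ne_nil hne
  rw [Bool.eq_iff_iff, decide_eq_true_iff, PySem.Set.contains_iff, hbad, hlist, pvCard]
  rfl

lemma pvSide (ts : List (String × String × List (String × String))) (f : List (String × String) → String)
    (H : ∀ t ∈ ts, f t.2.2 = t.2.1) :
    pvAOut ts f = pvBOut ts := by
  unfold pvAOut pvBOut
  rw [pvGrp_items, List.filter_map]
  have hent : ∀ k ∈ PySem.Set.ofList (ts.map (fun t => t.1)), (pvEnt ts k).map f = pvOth ts k := by
    intro k hk
    unfold pvEnt pvOth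
    rw [List.map_map]
    exact List.map_congr_left (fun t ht => H t (List.mem_of_mem_filter ht))
  rw [List.filter_congr (l := PySem.Set.ofList (ts.map (fun t => t.1)))
        (fun k hk => by
          show decide (1 < PySem.Set.len (PySem.Set.ofList ((pvEnt ts k).map f)))
              = PySem.Set.contains (pvBad ts) k
          rw [hent k hk, pvCond_eq ts k hk])]
  have hres : ts.foldl (pvCollectIp (pvBad ts)) PySem.Dict.empty
      = (ts.filter (fun t => PySem.Set.contains (pvBad ts) t.1)).foldl pvGrpStep PySem.Dict.empty := by
    rw [List.foldl_filter]
    rfl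
  rw [hres, pvGrp_items]
  rw [show (ts.filter (fun t => PySem.Set.contains (pvBad ts) t.1)).map (fun t => t.1)
        = (ts.map (fun t => t.1)).filter (fun k => PySem.Set.contains (pvBad ts) k) from
        List.filter_map.symm]
  rw [pvOfList_filter]
  apply List.map_congr_left
  intro k hk
  have hPk : PySem.Set.contains (pvBad ts) k = true := (List.mem_filter.mp hk).2
  have hE : pvEnt (ts.filter (fun t => PySem.Set.contains (pvBad ts) t.1)) k = pvEnt ts k := by
    unfold pvEnt
    rw [List.filter_filter]
    congr 1
    apply List.filter_congr
    intro t _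
    by_cases h1 : t.1 = k
    · simp [h1, (PySem.Set.contains_iff _ _).mp hPk]
    · simp [h1]
  rw [hE]

lemma pvA_closed (devices : List (List (String × String))) :
    collect_network_conflicts devices
      = (pvAOut (pvTrips devices) pvNormMac, pvAOut ((pvTrips devices).map pvSwap) pvNormIp) := by
  simp only [collect_network_conflicts]
  rw [pvA_fold, PySem.List.foldl_prod_mk pvGrpStep (fun d t => pvGrpStep d (pvSwap t))]
  have h2 : (pvTrips devices).foldl (fun d t => pvGrpStep d (pvSwap t)) PySem.Dict.empty
      = ((pvTrips devices).map pvSwap).foldl pvGrpStep PySem.Dict.empty :=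
    List.foldl_map.symm
  rw [h2]
  rfl

lemma pvB_closed (devices : List (List (String × String))) :
    collect_network_conflicts_alt devices
      = (pvBOut (pvTrips devices), pvBOut ((pvTrips devices).map pvSwap)) := by
  simp only [collect_network_conflicts_alt]
  rw [show (devices.foldl
        (fun acc dev =>
          if pvNormIp dev ≠ "" ∧ pvNormMac dev ≠ "" then acc ++ [(pvNormIp dev, pvNormMac dev, dev)]
          else acc) []) = pvTrips devices from rfl]
  rw [PySem.List.foldl_prod_mk, PySem.List.foldl_prod_mk]
  have hdet2 : (pvTrips devices).foldl pvFirstMac (PySem.Dict.empty, PySem.Set.empty)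
      = ((pvTrips devices).map pvSwap).foldl pvFirstIp (PySem.Dict.empty, PySem.Set.empty) := by
    rw [show pvFirstMac = (fun st t => pvFirstIp st (pvSwap t)) from rfl]
    exact List.foldl_map.symm
  rw [hdet2]
  have hres2 : ∀ bad : PySem.Set String,
      (pvTrips devices).foldl (pvCollectMac bad) PySem.Dict.empty
        = ((pvTrips devices).map pvSwap).foldl (pvCollectIp bad) PySem.Dict.empty := by
    intro bad
    rw [show pvCollectMac bad = (fun d t => pvCollectIp bad d (pvSwap t)) from rfl]
    exact List.foldl_map.symm
  rw [hres2]
  rfl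

lemma pvH1 (devices : List (List (String × String))) :
    ∀ t ∈ pvTrips devices, pvNormMac t.2.2 = t.2.1 := by
  intro t ht
  rw [pvTrips_closed] at ht
  obtain ⟨d, _, rfl⟩ := List.mem_map.mp ht
  rfl

lemma pvH2 (devices : List (List (String × String))) :
    ∀ t ∈ (pvTrips devices).map pvSwap, pvNormIp t.2.2 = t.2.1 := by
  intro t ht
  obtain ⟨u, hu, rfl⟩ := List.mem_map.mp ht
  rw [pvTrips_closed] at hu
  obtain ⟨d, _, rfl⟩ := List.mem_map.mp hu
  rfl

-- ===== VERDICT (by name: the statement is the Claim_ definition above) =====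
theorem collect_network_conflicts_spec : Claim_equal_collect_network_conflicts := by
  intro devices _
  unfold Spec_collect_network_conflicts
  rw [pvA_closed, pvB_closed, pvSide _ _ (pvH1 devices), pvSide _ _ (pvH2 devices)]
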